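-- pv_equiv track=rewrite | github.com/BMonah/DSA_3 | Microsoft/maximalNetworkRank.py | maximalNetwork
-- ===== SOURCE A (Python) =====
-- def maximalNetwork(n, roads):
--     count = [0] * n
--     road_map = {}
--
--     for a, b in roads:
--         count[a] += 1
--         count[b] += 1
--         road_map[(a, b)] = True
--         road_map[(b, a)] = True
--
--     maximal_rank = 0
--
--     for i in range(n):
--         for j in range(i+1, n):
--             rank = count[i] + count[j]
--             if (i, j) in road_map or (j, i) in road_map:
--                 rank -= 1
--             maximal_rank = max(maximal_rank, rank)
--
--     return maximal_rank
-- ===== SOURCE B (Python) =====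
-- def maximalNetwork(n, roads):
--     if n < 2:
--         return 0
--     deg = [0] * n
--     edges = set()
--     for a, b in roads:
--         deg[a] += 1
--         deg[b] += 1
--         edges.add((a, b))
--         edges.add((b, a))
--     d1 = max(deg)
--     top = [i for i in range(n) if deg[i] == d1]
--     k = len(top)
--     if k >= 2:
--         best = 2 * d1
--         top_set = set(top)
--         pairs = k * (k - 1) // 2
--         within = sum(1 for (a, b) in edges if a in top_set and b in top_set and a < b)
--     else:
--         t = top[0]
--         d2 = max(deg[i] for i in range(n) if i != t)
--         best = d1 + d2
--         cand = [i for i in range(n) if i != t and deg[i] == d2]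
--         pairs = len(cand)
--         within = sum(1 for i in cand if (t, i) in edges)
--     return best if within < pairs else best - 1
-- ===== Notes on version B (the rewrite author's own statement) =====
-- stated objective: faster
-- what changed: B replaces A's O(n^2) scan over all node pairs by the top-two-degree argument: it computes the degree array and a deduplicated edge set in one pass, then decides whether some maximum-degree-sum pair is non-adjacent by counting edges among the candidate (top-degree / second-degree) nodes, in O(n + E).
import Mathlib
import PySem

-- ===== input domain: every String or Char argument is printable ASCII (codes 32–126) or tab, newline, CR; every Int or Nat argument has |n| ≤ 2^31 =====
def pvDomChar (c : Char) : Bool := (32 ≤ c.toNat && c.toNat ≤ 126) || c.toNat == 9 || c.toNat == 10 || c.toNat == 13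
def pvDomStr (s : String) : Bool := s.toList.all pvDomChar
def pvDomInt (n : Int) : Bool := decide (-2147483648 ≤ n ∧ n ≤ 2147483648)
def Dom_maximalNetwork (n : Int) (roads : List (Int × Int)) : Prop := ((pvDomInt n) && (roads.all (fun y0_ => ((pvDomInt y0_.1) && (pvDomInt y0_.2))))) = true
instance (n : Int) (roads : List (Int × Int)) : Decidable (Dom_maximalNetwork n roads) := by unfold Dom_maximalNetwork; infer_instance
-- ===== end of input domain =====

-- B replaces A's O(n^2) all-pairs scan by the top-two-degree candidate argument (objective: faster).

-- ===== PORT A =====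
-- shared helper for the Python statement `lst[i] += 1` (both A and B contain it verbatim);
-- on an out-of-range index Python raises IndexError (excluded by Pre_) and the state is kept unchanged here
def pvBump (xs : List Int) (i : Int) : List Int :=
  match PySem.List.pyGet? xs i with
  | some v => PySem.List.pySetD xs i (v + 1)
  | none => xs

def maximalNetwork (n : Int) (roads : List (Int × Int)) : Int :=
  let st := roads.foldl
    (fun (st : List Int × PySem.Dict (Int × Int) Bool) p =>
      (pvBump (pvBump st.1 p.1) p.2,
       (st.2.insert (p.1, p.2) true).insert (p.2, p.1) true))
    (List.replicate n.toNat 0, PySem.Dict.empty)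
  let count := st.1
  let road_map := st.2
  (PySem.List.pyRange 0 n 1).foldl (fun mr i =>
    (PySem.List.pyRange (i + 1) n 1).foldl (fun mr j =>
      let rank := PySem.List.pyGetD count i 0 + PySem.List.pyGetD count j 0
      let rank := if road_map.contains (i, j) || road_map.contains (j, i) then rank - 1 else rank
      max mr rank) mr) 0

-- ===== PORT B =====
def maximalNetwork_alt (n : Int) (roads : List (Int × Int)) : Int :=
  if n < 2 then 0 else
  let st := roads.foldl
    (fun (st : List Int × PySem.Set (Int × Int)) p =>
      (pvBump (pvBump st.1 p.1) p.2,
       PySem.Set.add (PySem.Set.add st.2 (p.1, p.2)) (p.2, p.1)))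
    (List.replicate n.toNat 0, PySem.Set.empty)
  let deg := st.1
  let edges := st.2
  let d1 := (PySem.List.max? deg (fun x => x)).getD 0
  let top := (PySem.List.pyRange 0 n 1).filter (fun i => PySem.List.pyGetD deg i 0 == d1)
  let k : Int := (top.length : Int)
  if 2 ≤ k then
    let best := 2 * d1
    let topset := PySem.Set.ofList top
    let pairs := PySem.Int.floordiv (k * (k - 1)) 2
    let within := edges.foldl (fun acc p =>
      if topset.contains p.1 && topset.contains p.2 && decide (p.1 < p.2) then acc + 1 else acc) (0 : Int)
    if within < pairs then best else best - 1
  else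
    let t := PySem.List.pyGetD top 0 0
    let d2 := (PySem.List.max? (((PySem.List.pyRange 0 n 1).filter (fun i => !(i == t))).map
      (fun i => PySem.List.pyGetD deg i 0)) (fun x => x)).getD 0
    let best := d1 + d2
    let cand := (PySem.List.pyRange 0 n 1).filter (fun i => !(i == t) && PySem.List.pyGetD deg i 0 == d2)
    let pairs : Int := (cand.length : Int)
    let within := cand.foldl (fun acc i => if edges.contains (t, i) then acc + 1 else acc) (0 : Int)
    if within < pairs then best else best - 1

-- ===== PRECONDITION & SPEC =====
-- Pre_ excludes exactly the inputs on which the Python A raises IndexError: a road endpoint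
-- that is not a valid (possibly negative) Python index into the length-n degree list.
def Pre_maximalNetwork (n : Int) (roads : List (Int × Int)) : Prop :=
  ∀ p ∈ roads, (-n ≤ p.1 ∧ p.1 < n) ∧ (-n ≤ p.2 ∧ p.2 < n)
instance (n : Int) (roads : List (Int × Int)) : Decidable (Pre_maximalNetwork n roads) := by
  unfold Pre_maximalNetwork; infer_instance

def pvWitness_maximalNetwork : Int × (List (Int × Int)) := (3, [(0, 1), (1, 2)])

def Spec_maximalNetwork (n : Int) (roads : List (Int × Int)) (out : Int) : Prop := out = maximalNetwork_alt n roads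
instance (n : Int) (roads : List (Int × Int)) (out : Int) : Decidable (Spec_maximalNetwork n roads out) := by unfold Spec_maximalNetwork; infer_instance

-- ===== CLAIM (what is proved, stated in full; the proofs are below) =====
def Claim_equal_maximalNetwork : Prop := ∀ (n : Int) (roads : List (Int × Int)), Dom_maximalNetwork n roads → Pre_maximalNetwork n roads → Spec_maximalNetwork n roads (maximalNetwork n roads)

-- ===== LEMMAS AND PROOFS =====
-- proof-side vocabulary: the shared degree fold, adjacency, pair ranks, and B's named subterms

def pvStep (xs : List Int) (p : Int × Int) : List Int := pvBump (pvBump xs p.1) p.2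

def pvDeg (n : Int) (roads : List (Int × Int)) : List Int :=
  roads.foldl pvStep (List.replicate n.toNat 0)

def pvD (n : Int) (roads : List (Int × Int)) (i : Int) : Int :=
  PySem.List.pyGetD (pvDeg n roads) i 0

def pvAdj (roads : List (Int × Int)) (i j : Int) : Bool :=
  decide ((i, j) ∈ roads ∨ (j, i) ∈ roads)

def pvRank (n : Int) (roads : List (Int × Int)) (i j : Int) : Int :=
  pvD n roads i + pvD n roads j - (if pvAdj roads i j then 1 else 0)

def pvPairs (n : Int) : List (Int × Int) :=
  (PySem.List.pyRange 0 n 1).flatMap (fun i => (PySem.List.pyRange (i + 1) n 1).map (fun j => (i, j)))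

def pvAllPairs : List Int → List (Int × Int)
  | [] => []
  | x :: xs => xs.map (fun y => (x, y)) ++ pvAllPairs xs

def pvEdges (roads : List (Int × Int)) : PySem.Set (Int × Int) :=
  roads.foldl (fun s p => PySem.Set.add (PySem.Set.add s (p.1, p.2)) (p.2, p.1)) PySem.Set.empty

def pvD1 (n : Int) (roads : List (Int × Int)) : Int :=
  (PySem.List.max? (pvDeg n roads) (fun x => x)).getD 0

def pvTop (n : Int) (roads : List (Int × Int)) : List Int :=
  (PySem.List.pyRange 0 n 1).filter (fun i => PySem.List.pyGetD (pvDeg n roads) i 0 == pvD1 n roads)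

def pvT (n : Int) (roads : List (Int × Int)) : Int := PySem.List.pyGetD (pvTop n roads) 0 0

def pvD2 (n : Int) (roads : List (Int × Int)) : Int :=
  (PySem.List.max? (((PySem.List.pyRange 0 n 1).filter (fun i => !(i == pvT n roads))).map
    (fun i => PySem.List.pyGetD (pvDeg n roads) i 0)) (fun x => x)).getD 0

def pvCand (n : Int) (roads : List (Int × Int)) : List Int :=
  (PySem.List.pyRange 0 n 1).filter
    (fun i => !(i == pvT n roads) && PySem.List.pyGetD (pvDeg n roads) i 0 == pvD2 n roads)

lemma pvBump_cases (xs : List Int) (i : Int) :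
    pvBump xs i = xs ∨ ∃ m : Nat, ∃ h : m < xs.length, pvBump xs i = xs.set m (xs[m] + 1) := by
  unfold pvBump PySem.List.pyGet? PySem.List.pySetD PySem.List.pySet?
  cases hidx : PySem.List.pyIdx? xs.length i with
  | none => simp [hidx]
  | some m =>
    have hm : m < xs.length := by
      unfold PySem.List.pyIdx? at hidx
      split_ifs at hidx <;> simp_all <;> omega
    right
    exact ⟨m, hm, by simp [hidx, List.getElem?_eq_getElem hm]⟩

lemma length_pvBump (xs : List Int) (i : Int) : (pvBump xs i).length = xs.length := by
  rcases pvBump_cases xs i with h | ⟨m, hm, h⟩ <;> simp [h]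

lemma getD_pvBump_ge (xs : List Int) (i : Int) (k : Nat) :
    xs.getD k 0 ≤ (pvBump xs i).getD k 0 := by
  rcases pvBump_cases xs i with h | ⟨m, hm, h⟩
  · simp [h]
  · rw [h]
    rcases eq_or_ne m k with rfl | hne
    · simp [List.getD_eq_getElem?_getD, List.getElem?_set, hm, List.getElem?_eq_getElem hm]
    · simp [List.getD_eq_getElem?_getD, List.getElem?_set, hne]

lemma getD_pvBump_self (xs : List Int) (i : Int) (h0 : 0 ≤ i) (h : i < (xs.length : Int)) :
    (pvBump xs i).getD i.toNat 0 = xs.getD i.toNat 0 + 1 := by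
  have hm : i.toNat < xs.length := by omega
  unfold pvBump PySem.List.pyGet? PySem.List.pySetD PySem.List.pySet? PySem.List.pyIdx?
  simp only [if_pos h0, if_pos h]
  simp [List.getElem?_eq_getElem hm, List.getD_eq_getElem?_getD, List.getElem?_set, hm]

lemma length_foldl_pvStep (l : List (Int × Int)) (init : List Int) :
    (l.foldl pvStep init).length = init.length := by
  induction l generalizing init with
  | nil => rfl
  | cons p l ih => simp [List.foldl_cons, ih, pvStep, length_pvBump]

lemma getD_foldl_pvStep_ge (l : List (Int × Int)) (init : List Int) (k : Nat) :
    init.getD k 0 ≤ (l.foldl pvStep init).getD k 0 := by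
  induction l generalizing init with
  | nil => simp
  | cons p l ih =>
    calc init.getD k 0 ≤ (pvStep init p).getD k 0 := by
          exact le_trans (getD_pvBump_ge init p.1 k) (getD_pvBump_ge _ p.2 k)
      _ ≤ _ := ih (pvStep init p)

lemma length_pvDeg (n : Int) (roads : List (Int × Int)) : (pvDeg n roads).length = n.toNat := by
  simp [pvDeg, length_foldl_pvStep]

lemma getD_pvDeg_nonneg (n : Int) (roads : List (Int × Int)) (k : Nat) :
    0 ≤ (pvDeg n roads).getD k 0 := by
  have := getD_foldl_pvStep_ge roads (List.replicate n.toNat 0) k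
  have h0 : (List.replicate n.toNat (0:Int)).getD k 0 = 0 := by
    rcases lt_or_ge k n.toNat with h | h
    · simp [List.getD_eq_getElem?_getD, List.getElem?_replicate, h]
    · have hh : (List.replicate n.toNat (0:Int))[k]? = none :=
        List.getElem?_eq_none (by simpa using h)
      simp [List.getD_eq_getElem?_getD, hh]
  rw [pvDeg]; omega

lemma pvD_eq_getD (n : Int) (roads : List (Int × Int)) (i : Int) (h0 : 0 ≤ i) (h1 : i < n) :
    pvD n roads i = (pvDeg n roads).getD i.toNat 0 := by
  have hm : i.toNat < (pvDeg n roads).length := by rw [length_pvDeg]; omega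
  rw [pvD, PySem.List.pyGetD_eq_getElem _ 0 h0 (by rw [length_pvDeg]; omega),
    List.getD_eq_getElem?_getD, List.getElem?_eq_getElem hm]
  rfl

lemma pvD_nonneg (n : Int) (roads : List (Int × Int)) (i : Int) : 0 ≤ pvD n roads i := by
  rw [pvD, PySem.List.pyGetD]
  cases hg : PySem.List.pyGet? (pvDeg n roads) i with
  | none => simp
  | some v =>
    have hv : v ∈ pvDeg n roads := by
      rw [PySem.List.pyGet?] at hg
      cases hidx : PySem.List.pyIdx? (pvDeg n roads).length i with
      | none => rw [hidx] at hg; simp at hg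
      | some m =>
        rw [hidx] at hg; simp at hg
        exact List.mem_of_getElem? hg
    rcases List.mem_iff_getElem.mp hv with ⟨k, hk, hkv⟩
    have := getD_pvDeg_nonneg n roads k
    simp only [List.getD_eq_getElem?_getD, List.getElem?_eq_getElem hk, hkv] at this
    simpa using this

lemma pvD_mem (n : Int) (roads : List (Int × Int)) (i : Int) (h0 : 0 ≤ i) (h1 : i < n) :
    pvD n roads i ∈ pvDeg n roads := by
  have hm : i.toNat < (pvDeg n roads).length := by rw [length_pvDeg]; omega
  rw [pvD_eq_getD n roads i h0 h1, List.getD_eq_getElem?_getD, List.getElem?_eq_getElem hm]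
  exact List.getElem_mem hm

lemma getD_pvStep_self_fst (xs : List Int) (p : Int × Int) (h0 : 0 ≤ p.1) (h : p.1 < (xs.length : Int)) :
    1 + xs.getD p.1.toNat 0 ≤ (pvStep xs p).getD p.1.toNat 0 := by
  rw [pvStep]
  have h1 := getD_pvBump_self xs p.1 h0 h
  have h2 := getD_pvBump_ge (pvBump xs p.1) p.2 p.1.toNat
  omega

lemma getD_pvStep_self_snd (xs : List Int) (p : Int × Int) (h0 : 0 ≤ p.2) (h : p.2 < (xs.length : Int)) :
    1 + xs.getD p.2.toNat 0 ≤ (pvStep xs p).getD p.2.toNat 0 := by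
  rw [pvStep]
  have h1 := getD_pvBump_ge xs p.1 p.2.toNat
  have h2 := getD_pvBump_self (pvBump xs p.1) p.2 h0 (by rw [length_pvBump]; exact h)
  omega

lemma pvD_pos_of_endpoint (n : Int) (roads : List (Int × Int)) (a : Int)
    (h : ∃ p ∈ roads, p.1 = a ∨ p.2 = a) (h0 : 0 ≤ a) (h1 : a < n) :
    1 ≤ pvD n roads a := by
  rcases h with ⟨p, hp, hpa⟩
  rcases List.append_of_mem hp with ⟨l1, l2, rfl⟩
  rw [pvD_eq_getD _ _ a h0 h1, pvDeg, List.foldl_append, List.foldl_cons]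
  set X := l1.foldl pvStep (List.replicate n.toNat 0) with hX
  have hlen : X.length = n.toNat := by rw [hX, length_foldl_pvStep]; simp
  have hX0 : 0 ≤ X.getD a.toNat 0 := by
    have := getD_foldl_pvStep_ge l1 (List.replicate n.toNat 0) a.toNat
    have h0' : (List.replicate n.toNat (0:Int)).getD a.toNat 0 = 0 := by
      have hlt : a.toNat < n.toNat := by omega
      simp [List.getD_eq_getElem?_getD, List.getElem?_replicate, hlt]
    rw [hX]; omega
  have hstep : 1 ≤ (pvStep X p).getD a.toNat 0 := by
    rcases hpa with hpa | hpa
    · have := getD_pvStep_self_fst X p (by omega) (by rw [hlen]; omega)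
      rw [hpa] at this; omega
    · have := getD_pvStep_self_snd X p (by omega) (by rw [hlen]; omega)
      rw [hpa] at this; omega
  have := getD_foldl_pvStep_ge l2 (pvStep X p) a.toNat
  omega

lemma pvAdj_symm (roads : List (Int × Int)) (i j : Int) : pvAdj roads i j = pvAdj roads j i := by
  simp [pvAdj, or_comm]

lemma pvD_pos_of_adj (n : Int) (roads : List (Int × Int)) (i j : Int)
    (hadj : pvAdj roads i j = true) (h0 : 0 ≤ i) (h1 : i < n) :
    1 ≤ pvD n roads i := by
  apply pvD_pos_of_endpoint n roads i _ h0 h1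
  simp only [pvAdj, decide_eq_true_eq] at hadj
  rcases hadj with h | h
  · exact ⟨(i, j), h, Or.inl rfl⟩
  · exact ⟨(j, i), h, Or.inr rfl⟩

lemma dictFold_contains (roads : List (Int × Int)) (d : PySem.Dict (Int × Int) Bool) (q : Int × Int) :
    (roads.foldl (fun d p => (d.insert (p.1, p.2) true).insert (p.2, p.1) true) d).contains q
      = (d.contains q || roads.any (fun p => q == p || q == (p.2, p.1))) := by
  induction roads generalizing d with
  | nil => simp
  | cons p l ih =>
    rw [List.foldl_cons, ih, List.any_cons]
    simp only [PySem.Dict.contains_insert]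
    cases hq1 : q == (p.1, p.2) <;> cases hq2 : q == (p.2, p.1) <;>
      simp_all [Prod.ext_iff] <;> tauto

lemma dict_cond_eq_pvAdj (roads : List (Int × Int)) (i j : Int) :
    ((roads.foldl (fun d p => (d.insert (p.1, p.2) true).insert (p.2, p.1) true)
        (PySem.Dict.empty : PySem.Dict (Int × Int) Bool)).contains (i, j)
     || (roads.foldl (fun d p => (d.insert (p.1, p.2) true).insert (p.2, p.1) true)
        (PySem.Dict.empty : PySem.Dict (Int × Int) Bool)).contains (j, i)) = pvAdj roads i j := by
  rw [dictFold_contains, dictFold_contains]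
  simp only [PySem.Dict.contains_empty, Bool.false_or, pvAdj]
  rw [Bool.eq_iff_iff]
  simp only [List.any_eq_true, Bool.or_eq_true, beq_iff_eq, decide_eq_true_eq]
  constructor
  · rintro (⟨p, hp, h | h⟩ | ⟨p, hp, h | h⟩)
    · exact Or.inl (h ▸ hp)
    · have : p = (j, i) := by rw [Prod.ext_iff] at h ⊢; simp at h ⊢; omega
      exact Or.inr (this ▸ hp)
    · exact Or.inr (h ▸ hp)
    · have : p = (i, j) := by rw [Prod.ext_iff] at h ⊢; simp at h ⊢; omega
      exact Or.inl (this ▸ hp)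
  · rintro (h | h)
    · exact Or.inl ⟨(i, j), h, Or.inl rfl⟩
    · exact Or.inl ⟨(j, i), h, Or.inr rfl⟩

lemma setFold_mem (roads : List (Int × Int)) (s : PySem.Set (Int × Int)) (q : Int × Int) :
    q ∈ roads.foldl (fun s p => PySem.Set.add (PySem.Set.add s (p.1, p.2)) (p.2, p.1)) s
      ↔ q ∈ s ∨ ∃ p ∈ roads, q = p ∨ q = (p.2, p.1) := by
  induction roads generalizing s with
  | nil => simp
  | cons p l ih =>
    rw [List.foldl_cons, ih]
    simp only [PySem.Set.mem_add, List.mem_cons]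
    constructor
    · rintro (((h | h) | h) | h)
      · exact Or.inl h
      · exact Or.inr ⟨p, Or.inl rfl, Or.inl (by simpa using h)⟩
      · exact Or.inr ⟨p, Or.inl rfl, Or.inr h⟩
      · rcases h with ⟨r, hr, hq⟩; exact Or.inr ⟨r, Or.inr hr, hq⟩
    · rintro (h | ⟨r, hr | hr, hq⟩)
      · exact Or.inl (Or.inl (Or.inl h))
      · subst hr; rcases hq with hq | hq
        · exact Or.inl (Or.inl (Or.inr (by simpa using hq)))
        · exact Or.inl (Or.inr hq)
      · exact Or.inr ⟨r, hr, hq⟩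

lemma setFold_nodup (roads : List (Int × Int)) (s : PySem.Set (Int × Int)) (hs : s.Nodup) :
    (roads.foldl (fun s p => PySem.Set.add (PySem.Set.add s (p.1, p.2)) (p.2, p.1)) s).Nodup := by
  induction roads generalizing s with
  | nil => exact hs
  | cons p l ih =>
    exact ih _ (PySem.Set.nodup_add _ _ (PySem.Set.nodup_add _ _ hs))

lemma mem_edges_iff_pvAdj (roads : List (Int × Int)) (i j : Int) :
    ((i, j) ∈ roads.foldl (fun s p => PySem.Set.add (PySem.Set.add s (p.1, p.2)) (p.2, p.1))
        (PySem.Set.empty : PySem.Set (Int × Int))) ↔ pvAdj roads i j = true := by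
  rw [setFold_mem]
  simp only [pvAdj, decide_eq_true_eq, PySem.Set.empty]
  constructor
  · rintro (h | ⟨p, hp, hq | hq⟩)
    · simp at h
    · exact Or.inl (hq ▸ (by simpa using hp))
    · have : p = (j, i) := by rw [Prod.ext_iff] at hq ⊢; simp at hq ⊢; omega
      exact Or.inr (this ▸ hp)
  · rintro (h | h)
    · exact Or.inr ⟨(i, j), h, Or.inl rfl⟩
    · exact Or.inr ⟨(j, i), h, Or.inr rfl⟩

lemma ite_sub_one (c : Bool) (a b : Int) :
    (if c then a + b - 1 else a + b) = a + b - (if c then 1 else 0) := by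
  cases c <;> simp

lemma A_char (n : Int) (roads : List (Int × Int)) :
    maximalNetwork n roads = ((pvPairs n).map (fun p => pvRank n roads p.1 p.2)).foldl max 0 := by
  rw [maximalNetwork]
  rw [PySem.List.foldl_prod_mk (f := fun xs (p : Int × Int) => pvBump (pvBump xs p.1) p.2)
      (g := fun (d : PySem.Dict (Int × Int) Bool) (p : Int × Int) =>
        (d.insert (p.1, p.2) true).insert (p.2, p.1) true)]
  have hfold : roads.foldl
      (fun (st : List Int) (p : Int × Int) => pvBump (pvBump st p.1) p.2)
      (List.replicate n.toNat 0) = pvDeg n roads := rfl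
  simp only [hfold, dict_cond_eq_pvAdj, ite_sub_one]
  rw [pvPairs, List.map_flatMap, List.foldl_flatMap]
  simp only [List.map_map, List.foldl_map, Function.comp, pvRank, pvD]

lemma mem_pvPairs (n : Int) (p : Int × Int) :
    p ∈ pvPairs n ↔ 0 ≤ p.1 ∧ p.1 < p.2 ∧ p.2 < n := by
  rw [pvPairs]
  simp only [List.mem_flatMap, List.mem_map, PySem.List.mem_pyRange_one]
  constructor
  · rintro ⟨i, ⟨hi0, hin⟩, j, ⟨hj1, hj2⟩, rfl⟩
    exact ⟨hi0, by omega, hj2⟩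
  · rintro ⟨h0, h1, h2⟩
    exact ⟨p.1, ⟨h0, by omega⟩, p.2, ⟨by omega, h2⟩, rfl⟩

lemma foldl_max_eq (L : List Int) (M : Int) (hub : ∀ x ∈ L, x ≤ M) (hmem : M ∈ L) (hM : 0 ≤ M) :
    L.foldl max 0 = M := by
  have h1 := (PySem.List.le_foldl_max L 0).2 M hmem
  rcases PySem.List.foldl_max_mem L 0 with h | h
  · omega
  · exact le_antisymm (hub _ h) h1

lemma mem_pvAllPairs (l : List Int) (hl : l.Pairwise (· < ·)) (p : Int × Int) :
    p ∈ pvAllPairs l ↔ p.1 ∈ l ∧ p.2 ∈ l ∧ p.1 < p.2 := by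
  induction l with
  | nil => simp [pvAllPairs]
  | cons x xs ih =>
    have hx : ∀ y ∈ xs, x < y := by
      intro y hy; exact (List.pairwise_cons.mp hl).1 y hy
    rw [pvAllPairs]
    simp only [List.mem_append, List.mem_map, List.mem_cons,
      ih (List.pairwise_cons.mp hl).2]
    constructor
    · rintro (⟨y, hy, rfl⟩ | ⟨h1, h2, h3⟩)
      · exact ⟨Or.inl rfl, Or.inr hy, hx y hy⟩
      · exact ⟨Or.inr h1, Or.inr h2, h3⟩
    · rintro ⟨h1 | h1, h2 | h2, h3⟩
      · omega
      · exact Or.inl ⟨p.2, h2, Prod.ext h1.symm rfl⟩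
      · have := hx p.1 h1; omega
      · exact Or.inr ⟨h1, h2, h3⟩

lemma nodup_pvAllPairs (l : List Int) (hl : l.Pairwise (· < ·)) : (pvAllPairs l).Nodup := by
  induction l with
  | nil => simp [pvAllPairs]
  | cons x xs ih =>
    have hnd : xs.Nodup := ((List.pairwise_cons.mp hl).2).imp ne_of_lt
    have hx : ∀ y ∈ xs, x < y := (List.pairwise_cons.mp hl).1
    rw [pvAllPairs]
    refine List.Nodup.append ?_ (ih (List.pairwise_cons.mp hl).2) ?_
    · refine List.Nodup.map ?_ hnd
      intro a b h
      simpa using congrArg Prod.snd h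
    · intro p hp1 hp2
      rcases List.mem_map.mp hp1 with ⟨y, _, rfl⟩
      rw [mem_pvAllPairs xs (List.pairwise_cons.mp hl).2] at hp2
      have := hx _ hp2.1
      simp at this

lemma two_mul_length_pvAllPairs (l : List Int) :
    2 * (pvAllPairs l).length = l.length * (l.length - 1) := by
  induction l with
  | nil => simp [pvAllPairs]
  | cons x xs ih =>
    rw [pvAllPairs]
    simp only [List.length_append, List.length_map, List.length_cons]
    have hring : (xs.length + 1) * (xs.length + 1 - 1) = xs.length * xs.length + xs.length := by
      simp [Nat.add_sub_cancel]; ring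
    have hring2 : xs.length * (xs.length - 1) = xs.length * xs.length - xs.length := by
      cases xs.length with
      | zero => rfl
      | succ m => simp [Nat.succ_sub_one, Nat.mul_succ, Nat.succ_mul]
    have hle : xs.length ≤ xs.length * xs.length := by
      cases xs.length with
      | zero => exact le_refl 0
      | succ m => exact Nat.le_mul_of_pos_left _ (Nat.succ_pos m)
    omega

lemma B_char (n : Int) (roads : List (Int × Int)) (hn : ¬ n < 2) :
    maximalNetwork_alt n roads =
      if 2 ≤ ((pvTop n roads).length : Int) then
        (if (pvEdges roads).foldl (fun acc p =>
              if (PySem.Set.ofList (pvTop n roads)).contains p.1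
                  && (PySem.Set.ofList (pvTop n roads)).contains p.2 && decide (p.1 < p.2)
              then acc + 1 else acc) (0 : Int)
            < PySem.Int.floordiv (((pvTop n roads).length : Int) * (((pvTop n roads).length : Int) - 1)) 2
         then 2 * pvD1 n roads else 2 * pvD1 n roads - 1)
      else
        (if (pvCand n roads).foldl (fun acc i =>
              if (pvEdges roads).contains (pvT n roads, i) then acc + 1 else acc) (0 : Int)
            < ((pvCand n roads).length : Int)
         then pvD1 n roads + pvD2 n roads else pvD1 n roads + pvD2 n roads - 1) := by
  rw [maximalNetwork_alt, if_neg hn,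
    PySem.List.foldl_prod_mk (f := fun xs (p : Int × Int) => pvBump (pvBump xs p.1) p.2)
      (g := fun (s : PySem.Set (Int × Int)) (p : Int × Int) =>
        PySem.Set.add (PySem.Set.add s (p.1, p.2)) (p.2, p.1))]
  rfl

lemma d1_spec (n : Int) (roads : List (Int × Int)) (hn : 2 ≤ n) :
    pvD1 n roads ∈ pvDeg n roads ∧ ∀ y ∈ pvDeg n roads, y ≤ pvD1 n roads := by
  have hne : pvDeg n roads ≠ [] := by
    intro h
    have := length_pvDeg n roads
    rw [h] at this; simp at this; omega
  cases hmax : PySem.List.max? (pvDeg n roads) (fun x => x) with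
  | none => exact absurd ((PySem.List.max?_eq_none_iff _ _).mp hmax) hne
  | some m =>
    have h1 : pvD1 n roads = m := by rw [pvD1, hmax]; rfl
    rw [h1]
    exact ⟨PySem.List.max?_mem hmax, PySem.List.max?_isMax hmax⟩

lemma pvD_le_d1 (n : Int) (roads : List (Int × Int)) (hn : 2 ≤ n) (i : Int)
    (h0 : 0 ≤ i) (h1 : i < n) : pvD n roads i ≤ pvD1 n roads :=
  (d1_spec n roads hn).2 _ (pvD_mem n roads i h0 h1)

lemma exists_top (n : Int) (roads : List (Int × Int)) (hn : 2 ≤ n) :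
    ∃ i, 0 ≤ i ∧ i < n ∧ pvD n roads i = pvD1 n roads := by
  rcases List.mem_iff_getElem.mp (d1_spec n roads hn).1 with ⟨k, hk, he⟩
  refine ⟨(k : Int), by omega, ?_, ?_⟩
  · have := length_pvDeg n roads; omega
  · rw [pvD_eq_getD n roads _ (by omega) (by have := length_pvDeg n roads; omega)]
    simp only [Int.toNat_natCast]
    rw [List.getD_eq_getElem?_getD, List.getElem?_eq_getElem hk]
    simpa using he

lemma mem_pvTop (n : Int) (roads : List (Int × Int)) (i : Int) :
    i ∈ pvTop n roads ↔ 0 ≤ i ∧ i < n ∧ pvD n roads i = pvD1 n roads := by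
  rw [pvTop]
  simp only [List.mem_filter, PySem.List.mem_pyRange_one, beq_iff_eq]
  rw [show PySem.List.pyGetD (pvDeg n roads) i 0 = pvD n roads i from rfl]
  tauto

lemma pairwise_pvTop (n : Int) (roads : List (Int × Int)) : (pvTop n roads).Pairwise (· < ·) :=
  (PySem.List.pairwise_lt_pyRange_one 0 n).filter _

lemma pvTop_ne_nil (n : Int) (roads : List (Int × Int)) (hn : 2 ≤ n) : pvTop n roads ≠ [] := by
  rcases exists_top n roads hn with ⟨i, h0, h1, h2⟩
  intro h
  have : i ∈ pvTop n roads := (mem_pvTop n roads i).mpr ⟨h0, h1, h2⟩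
  rw [h] at this; simp at this

-- core evaluation of the all-pairs running max

lemma core_pos (n : Int) (roads : List (Int × Int)) (Mx : Int)
    (hub : ∀ i j, 0 ≤ i → i < j → j < n → pvD n roads i + pvD n roads j ≤ Mx)
    (hEx : ∃ i j, 0 ≤ i ∧ i < j ∧ j < n ∧ pvD n roads i + pvD n roads j = Mx ∧ pvAdj roads i j = false) :
    ((pvPairs n).map (fun p => pvRank n roads p.1 p.2)).foldl max 0 = Mx := by
  rcases hEx with ⟨i, j, h0, h1, h2, hsum, hadj⟩
  apply foldl_max_eq
  · intro x hx
    rcases List.mem_map.mp hx with ⟨p, hp, rfl⟩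
    rw [mem_pvPairs] at hp
    have := hub p.1 p.2 hp.1 hp.2.1 hp.2.2
    rw [pvRank]; split <;> omega
  · refine List.mem_map.mpr ⟨(i, j), (mem_pvPairs n (i, j)).mpr ⟨h0, h1, h2⟩, ?_⟩
    rw [pvRank]; simp [hadj, hsum]
  · have := pvD_nonneg n roads i
    have := pvD_nonneg n roads j
    omega

lemma core_neg (n : Int) (roads : List (Int × Int)) (Mx : Int)
    (hub : ∀ i j, 0 ≤ i → i < j → j < n → pvD n roads i + pvD n roads j ≤ Mx)
    (hat : ∃ i j, 0 ≤ i ∧ i < j ∧ j < n ∧ pvD n roads i + pvD n roads j = Mx)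
    (hnEx : ∀ i j, 0 ≤ i → i < j → j < n → pvD n roads i + pvD n roads j = Mx → pvAdj roads i j = true) :
    ((pvPairs n).map (fun p => pvRank n roads p.1 p.2)).foldl max 0 = Mx - 1 := by
  rcases hat with ⟨i, j, h0, h1, h2, hsum⟩
  have hadj : pvAdj roads i j = true := hnEx i j h0 h1 h2 hsum
  apply foldl_max_eq
  · intro x hx
    rcases List.mem_map.mp hx with ⟨p, hp, rfl⟩
    rw [mem_pvPairs] at hp
    have hle := hub p.1 p.2 hp.1 hp.2.1 hp.2.2
    rcases eq_or_lt_of_le hle with he | hlt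
    · have := hnEx p.1 p.2 hp.1 hp.2.1 hp.2.2 he
      rw [pvRank, this]; simp; omega
    · rw [pvRank]; split <;> omega
  · refine List.mem_map.mpr ⟨(i, j), (mem_pvPairs n (i, j)).mpr ⟨h0, h1, h2⟩, ?_⟩
    rw [pvRank]; simp [hadj, hsum]
  · have h1' := pvD_pos_of_adj n roads i j hadj h0 (by omega)
    have := pvD_nonneg n roads j
    omega

lemma countP_lt_length_iff {α : Type} (l : List α) (p : α → Bool) :
    l.countP p < l.length ↔ ∃ a ∈ l, p a = false := by
  constructor
  · intro h
    by_contra hc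
    push_neg at hc
    have : ∀ a ∈ l, p a = true := by
      intro a ha
      cases hpa : p a
      · exact absurd hpa (hc a ha)
      · rfl
    rw [List.countP_eq_length.mpr this] at h
    omega
  · rintro ⟨a, ha, hpa⟩
    rcases List.append_of_mem ha with ⟨s, t, rfl⟩
    rw [List.countP_append, List.countP_cons, List.length_append, List.length_cons, hpa]
    have := List.countP_le_length (p := p) (l := s)
    have := List.countP_le_length (p := p) (l := t)
    simp; omega

lemma branch2_test (n : Int) (roads : List (Int × Int)) (hn : 2 ≤ n)
    (hk : 2 ≤ (pvTop n roads).length) :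
    ((pvEdges roads).foldl (fun acc p =>
        if (PySem.Set.ofList (pvTop n roads)).contains p.1
            && (PySem.Set.ofList (pvTop n roads)).contains p.2 && decide (p.1 < p.2)
        then acc + 1 else acc) (0 : Int)
      < PySem.Int.floordiv (((pvTop n roads).length : Int) * (((pvTop n roads).length : Int) - 1)) 2)
    ↔ (∃ i j, 0 ≤ i ∧ i < j ∧ j < n ∧
        pvD n roads i + pvD n roads j = 2 * pvD1 n roads ∧ pvAdj roads i j = false) := by
  set top := pvTop n roads with htop
  set q : Int × Int → Bool := fun p =>
    (PySem.Set.ofList top).contains p.1 && (PySem.Set.ofList top).contains p.2 && decide (p.1 < p.2)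
    with hq
  set AP := pvAllPairs top with hAP
  -- within as a countP
  rw [PySem.List.foldl_if_add_one q (pvEdges roads) 0]
  -- pairs as the length of AP
  have hpairs : PySem.Int.floordiv (((top).length : Int) * (((top).length : Int) - 1)) 2
      = (AP.length : Int) := by
    have h2 := two_mul_length_pvAllPairs top
    have hcast : ((top).length : Int) * (((top).length : Int) - 1) = 2 * (AP.length : Int) := by
      have h2' : (top.length * (top.length - 1) : Nat) = 2 * AP.length := h2.symm
      have hk1 : 1 ≤ top.length := by omega
      zify [hk1] at h2'
      exact h2'
    rw [hcast, PySem.Int.floordiv_eq_ediv_of_pos (by norm_num)]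
    exact Int.mul_ediv_cancel_left _ (by norm_num)
  rw [hpairs]
  -- q holds exactly on candidate pairs
  have hqc : ∀ p : Int × Int, q p = true ↔ p.1 ∈ top ∧ p.2 ∈ top ∧ p.1 < p.2 := by
    intro p
    rw [hq]
    simp [PySem.Set.contains, PySem.Set.mem_ofList]
    tauto
  -- count equality via a permutation of the filtered lists
  have hperm : List.Perm ((pvEdges roads).filter q) (AP.filter (fun p => pvAdj roads p.1 p.2)) := by
    refine (List.perm_ext_iff_of_nodup
      (List.Nodup.filter _ (setFold_nodup roads _ List.nodup_nil))
      (List.Nodup.filter _ (nodup_pvAllPairs top (pairwise_pvTop n roads)))).mpr ?_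
    intro p
    have he := mem_edges_iff_pvAdj roads p.1 p.2
    rw [List.mem_filter, List.mem_filter, hqc, mem_pvAllPairs top (pairwise_pvTop n roads)]
    constructor
    · rintro ⟨hm, hq3⟩; exact ⟨hq3, he.mp hm⟩
    · rintro ⟨hq3, ha⟩; exact ⟨he.mpr ha, hq3⟩
  have hcount : (pvEdges roads).countP q = AP.countP (fun p => pvAdj roads p.1 p.2) := by
    rw [List.countP_eq_length_filter, List.countP_eq_length_filter, hperm.length_eq]
  rw [hcount]
  have hlt : ((0 : Int) + (AP.countP (fun p => pvAdj roads p.1 p.2) : Int) < (AP.length : Int))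
      ↔ AP.countP (fun p => pvAdj roads p.1 p.2) < AP.length := by omega
  rw [hlt, countP_lt_length_iff]
  constructor
  · rintro ⟨p, hp, hpf⟩
    rw [hAP, mem_pvAllPairs top (pairwise_pvTop n roads)] at hp
    rw [htop] at hp
    rw [mem_pvTop] at hp
    obtain ⟨⟨h01, h1n, hd1⟩, hp2, hlt'⟩ := hp
    rw [mem_pvTop] at hp2
    exact ⟨p.1, p.2, h01, hlt', hp2.2.1, by omega, hpf⟩
  · rintro ⟨i, j, h0, h1, h2, hsum, hadj⟩
    have hdi : pvD n roads i ≤ pvD1 n roads := pvD_le_d1 n roads hn i h0 (by omega)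
    have hdj : pvD n roads j ≤ pvD1 n roads := pvD_le_d1 n roads hn j (by omega) h2
    have hdi' : pvD n roads i = pvD1 n roads := by omega
    have hdj' : pvD n roads j = pvD1 n roads := by omega
    refine ⟨(i, j), ?_, hadj⟩
    rw [hAP, mem_pvAllPairs top (pairwise_pvTop n roads), htop, mem_pvTop, mem_pvTop]
    exact ⟨⟨h0, by omega, hdi'⟩, ⟨by omega, h2, hdj'⟩, h1⟩

lemma top_singleton (n : Int) (roads : List (Int × Int)) (hn : 2 ≤ n)
    (hk : (pvTop n roads).length < 2) : pvTop n roads = [pvT n roads] := by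
  rcases h : pvTop n roads with _ | ⟨a, tl⟩
  · exact absurd h (pvTop_ne_nil n roads hn)
  · rcases h' : tl with _ | ⟨b, rest⟩
    · have : pvT n roads = a := by rw [pvT, h, PySem.List.pyGetD_zero_cons]
      rw [this]
    · exfalso
      rw [h, h'] at hk
      simp at hk

lemma pvT_spec (n : Int) (roads : List (Int × Int)) (hn : 2 ≤ n)
    (hk : (pvTop n roads).length < 2) :
    0 ≤ pvT n roads ∧ pvT n roads < n ∧ pvD n roads (pvT n roads) = pvD1 n roads := by
  have := top_singleton n roads hn hk
  have hm : pvT n roads ∈ pvTop n roads := by rw [this]; simp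
  exact (mem_pvTop n roads _).mp hm

lemma pvT_uniq (n : Int) (roads : List (Int × Int)) (hn : 2 ≤ n)
    (hk : (pvTop n roads).length < 2) (i : Int)
    (h0 : 0 ≤ i) (h1 : i < n) (hd : pvD n roads i = pvD1 n roads) : i = pvT n roads := by
  have hm : i ∈ pvTop n roads := (mem_pvTop n roads i).mpr ⟨h0, h1, hd⟩
  rw [top_singleton n roads hn hk] at hm
  simpa using hm

lemma d2_spec (n : Int) (roads : List (Int × Int)) (hn : 2 ≤ n) :
    (∃ c, 0 ≤ c ∧ c < n ∧ c ≠ pvT n roads ∧ pvD n roads c = pvD2 n roads) ∧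
    (∀ i, 0 ≤ i → i < n → i ≠ pvT n roads → pvD n roads i ≤ pvD2 n roads) := by
  set L2 := ((PySem.List.pyRange 0 n 1).filter (fun i => !(i == pvT n roads))).map
    (fun i => PySem.List.pyGetD (pvDeg n roads) i 0) with hL2
  have hmem : ∀ x, x ∈ L2 ↔ ∃ i, 0 ≤ i ∧ i < n ∧ i ≠ pvT n roads ∧ pvD n roads i = x := by
    intro x
    rw [hL2]
    simp only [List.mem_map, List.mem_filter, PySem.List.mem_pyRange_one, Bool.not_eq_eq_eq_not,
      Bool.not_true, beq_eq_false_iff_ne, ne_eq]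
    constructor
    · rintro ⟨i, ⟨⟨hi0, hin⟩, hit⟩, rfl⟩
      exact ⟨i, hi0, hin, hit, rfl⟩
    · rintro ⟨i, hi0, hin, hit, hx⟩
      exact ⟨i, ⟨⟨hi0, hin⟩, hit⟩, hx⟩
  have hne : L2 ≠ [] := by
    intro h
    have hi0 : pvD n roads (if pvT n roads = 0 then 1 else 0) ∈ L2 := by
      rw [hmem]
      exact ⟨_, by split <;> omega, by split <;> omega, by split <;> omega, rfl⟩
    rw [h] at hi0; simp at hi0
  cases hmax : PySem.List.max? L2 (fun x => x) with
  | none => exact absurd ((PySem.List.max?_eq_none_iff _ _).mp hmax) hne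
  | some m =>
    have hd2 : pvD2 n roads = m := by rw [pvD2, ← hL2, hmax]; rfl
    constructor
    · have := PySem.List.max?_mem hmax
      rw [hmem] at this
      rcases this with ⟨c, h0, h1, h2, h3⟩
      exact ⟨c, h0, h1, h2, by rw [hd2, h3]⟩
    · intro i h0 h1 h2
      have : pvD n roads i ∈ L2 := (hmem _).mpr ⟨i, h0, h1, h2, rfl⟩
      have := PySem.List.max?_isMax hmax _ this
      rw [hd2]; exact this

lemma d2_lt_d1 (n : Int) (roads : List (Int × Int)) (hn : 2 ≤ n)
    (hk : (pvTop n roads).length < 2) : pvD2 n roads < pvD1 n roads := by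
  rcases (d2_spec n roads hn).1 with ⟨c, h0, h1, h2, h3⟩
  have hle : pvD n roads c ≤ pvD1 n roads := pvD_le_d1 n roads hn c h0 h1
  have hne : pvD n roads c ≠ pvD1 n roads := fun h => h2 (pvT_uniq n roads hn hk c h0 h1 h)
  omega

lemma mem_pvCand (n : Int) (roads : List (Int × Int)) (i : Int) :
    i ∈ pvCand n roads ↔ 0 ≤ i ∧ i < n ∧ i ≠ pvT n roads ∧ pvD n roads i = pvD2 n roads := by
  rw [pvCand]
  simp only [List.mem_filter, PySem.List.mem_pyRange_one, Bool.and_eq_true, Bool.not_eq_eq_eq_not,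
    Bool.not_true, beq_eq_false_iff_ne, ne_eq, beq_iff_eq]
  rw [show PySem.List.pyGetD (pvDeg n roads) i 0 = pvD n roads i from rfl]
  tauto

lemma branch1_test (n : Int) (roads : List (Int × Int)) (hn : 2 ≤ n)
    (hk : (pvTop n roads).length < 2) :
    ((pvCand n roads).foldl (fun acc i =>
        if (pvEdges roads).contains (pvT n roads, i) then acc + 1 else acc) (0 : Int)
      < ((pvCand n roads).length : Int))
    ↔ (∃ i j, 0 ≤ i ∧ i < j ∧ j < n ∧
        pvD n roads i + pvD n roads j = pvD1 n roads + pvD2 n roads ∧ pvAdj roads i j = false) := by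
  have ht := pvT_spec n roads hn hk
  have hd2 := d2_spec n roads hn
  have hlt := d2_lt_d1 n roads hn hk
  set t := pvT n roads with htdef
  set p : Int → Bool := fun i => (pvEdges roads).contains (t, i) with hp
  rw [PySem.List.foldl_if_add_one p (pvCand n roads) 0]
  have hpc : ∀ i, p i = pvAdj roads t i := by
    intro i
    simp only [hp]
    have h1 : (pvEdges roads).contains (t, i) = decide ((t, i) ∈ pvEdges roads) := by
      simp [PySem.Set.contains]
    have h2 := mem_edges_iff_pvAdj roads t i
    rw [pvAdj, decide_eq_true_eq] at h2
    rw [h1, pvAdj, decide_eq_decide]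
    exact h2
  rw [funext hpc]
  have hcast : ((0 : Int) + ((pvCand n roads).countP (fun i => pvAdj roads t i) : Int)
      < ((pvCand n roads).length : Int))
      ↔ (pvCand n roads).countP (fun i => pvAdj roads t i) < (pvCand n roads).length := by
    omega
  rw [hcast, countP_lt_length_iff]
  constructor
  · rintro ⟨i, hi, hadj⟩
    rw [mem_pvCand] at hi
    obtain ⟨h0, h1, h2, h3⟩ := hi
    rcases lt_or_gt_of_ne (Ne.symm h2) with hlt' | hlt'
    · exact ⟨t, i, ht.1, hlt', h1, by rw [ht.2.2, h3], hadj⟩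
    · refine ⟨i, t, h0, hlt', ht.2.1, by rw [ht.2.2, h3]; ring, ?_⟩
      rw [pvAdj_symm]; exact hadj
  · rintro ⟨i, j, h0, h1, h2, hsum, hadj⟩
    by_cases hit : i = t
    · subst hit
      have hjd : pvD n roads j = pvD2 n roads := by
        have := ht.2.2; omega
      refine ⟨j, (mem_pvCand n roads j).mpr ⟨by omega, h2, by omega, hjd⟩, hadj⟩
    · by_cases hjt : j = t
      · subst hjt
        have hid : pvD n roads i = pvD2 n roads := by
          have := ht.2.2; omega
        refine ⟨i, (mem_pvCand n roads i).mpr ⟨h0, by omega, hit, hid⟩, ?_⟩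
        rw [pvAdj_symm]; exact hadj
      · exfalso
        have hi2 : pvD n roads i ≤ pvD2 n roads := hd2.2 i h0 (by omega) hit
        have hj2 : pvD n roads j ≤ pvD2 n roads := hd2.2 j (by omega) h2 hjt
        omega

lemma branch1_bounds (n : Int) (roads : List (Int × Int)) (hn : 2 ≤ n)
    (hk : (pvTop n roads).length < 2) :
    (∀ i j, 0 ≤ i → i < j → j < n →
      pvD n roads i + pvD n roads j ≤ pvD1 n roads + pvD2 n roads) ∧
    (∃ i j, 0 ≤ i ∧ i < j ∧ j < n ∧
      pvD n roads i + pvD n roads j = pvD1 n roads + pvD2 n roads) := by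
  have ht := pvT_spec n roads hn hk
  have hd2 := d2_spec n roads hn
  have hlt := d2_lt_d1 n roads hn hk
  constructor
  · intro i j h0 h1 h2
    by_cases hit : i = pvT n roads
    · subst hit
      have := hd2.2 j (by omega) h2 (by omega)
      have := pvD_le_d1 n roads hn (pvT n roads) ht.1 ht.2.1
      omega
    · by_cases hjt : j = pvT n roads
      · subst hjt
        have := hd2.2 i h0 (by omega) hit
        have := pvD_le_d1 n roads hn (pvT n roads) ht.1 ht.2.1
        omega
      · have := hd2.2 i h0 (by omega) hit
        have := hd2.2 j (by omega) h2 hjt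
        omega
  · rcases hd2.1 with ⟨c, h0, h1, h2, h3⟩
    rcases lt_or_gt_of_ne h2 with hlt' | hlt'
    · exact ⟨c, pvT n roads, h0, hlt', ht.2.1, by rw [ht.2.2, h3]; ring⟩
    · exact ⟨pvT n roads, c, ht.1, hlt', h1, by rw [ht.2.2, h3]⟩

-- the Lean ports are total and agree on every input (outside Pre_ the Python A raises, so
-- nothing is claimed there); the Pre_ hypothesis is therefore carried but not consumed
lemma main_eq (n : Int) (roads : List (Int × Int)) (_pre : Pre_maximalNetwork n roads) :
    maximalNetwork n roads = maximalNetwork_alt n roads := by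
  rcases lt_or_ge n 2 with hn | hn
  · rw [A_char, maximalNetwork_alt, if_pos hn]
    have hnil : pvPairs n = [] := by
      rw [List.eq_nil_iff_forall_not_mem]
      intro p hp
      rw [mem_pvPairs] at hp
      omega
    rw [hnil]
    rfl
  · rw [A_char, B_char n roads (by omega)]
    by_cases hk : 2 ≤ ((pvTop n roads).length : Int)
    · rw [if_pos hk]
      have hkn : 2 ≤ (pvTop n roads).length := by exact_mod_cast hk
      have hub : ∀ i j, 0 ≤ i → i < j → j < n →
          pvD n roads i + pvD n roads j ≤ 2 * pvD1 n roads := by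
        intro i j h0 h1 h2
        have := pvD_le_d1 n roads hn i h0 (by omega)
        have := pvD_le_d1 n roads hn j (by omega) h2
        omega
      have hat : ∃ i j, 0 ≤ i ∧ i < j ∧ j < n ∧
          pvD n roads i + pvD n roads j = 2 * pvD1 n roads := by
        obtain ⟨a, b, rest, htop⟩ : ∃ a b rest, pvTop n roads = a :: b :: rest := by
          rcases h : pvTop n roads with _ | ⟨a, tl⟩
          · rw [h] at hkn; simp at hkn
          · rcases h' : tl with _ | ⟨b, rest⟩
            · rw [h, h'] at hkn; simp at hkn
            · exact ⟨a, b, rest, by simp [h, h']⟩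
        have ha : a ∈ pvTop n roads := by rw [htop]; simp
        have hb : b ∈ pvTop n roads := by rw [htop]; simp
        have hab : a < b := by
          have := pairwise_pvTop n roads
          rw [htop] at this
          exact (List.pairwise_cons.mp this).1 b (by simp)
        rw [mem_pvTop] at ha hb
        exact ⟨a, b, ha.1, hab, hb.2.1, by omega⟩
      by_cases hEx : ∃ i j, 0 ≤ i ∧ i < j ∧ j < n ∧
          pvD n roads i + pvD n roads j = 2 * pvD1 n roads ∧ pvAdj roads i j = false
      · rw [if_pos ((branch2_test n roads hn hkn).mpr hEx)]
        exact core_pos n roads _ hub hEx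
      · rw [if_neg (fun h => hEx ((branch2_test n roads hn hkn).mp h))]
        apply core_neg n roads _ hub hat
        intro i j h0 h1 h2 hsum
        cases hadj : pvAdj roads i j with
        | false => exact absurd ⟨i, j, h0, h1, h2, hsum, hadj⟩ hEx
        | true => rfl
    · rw [if_neg hk]
      have hkn : (pvTop n roads).length < 2 := by
        by_contra h
        exact hk (by omega)
      obtain ⟨hub, hat⟩ := branch1_bounds n roads hn hkn
      by_cases hEx : ∃ i j, 0 ≤ i ∧ i < j ∧ j < n ∧
          pvD n roads i + pvD n roads j = pvD1 n roads + pvD2 n roads ∧ pvAdj roads i j = false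
      · rw [if_pos ((branch1_test n roads hn hkn).mpr hEx)]
        exact core_pos n roads _ hub hEx
      · rw [if_neg (fun h => hEx ((branch1_test n roads hn hkn).mp h))]
        apply core_neg n roads _ hub hat
        intro i j h0 h1 h2 hsum
        cases hadj : pvAdj roads i j with
        | false => exact absurd ⟨i, j, h0, h1, h2, hsum, hadj⟩ hEx
        | true => rfl

-- ===== VERDICT (by name: the statement is the Claim_ definition above) =====
theorem maximalNetwork_spec : Claim_equal_maximalNetwork := by
  intro n roads _ pre
  unfold Spec_maximalNetwork
  exact main_eq n roads pre
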